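-- pv_equiv track=rewrite | github.com/Tram-Tran/FibUnet | unet_mlp.py | fibonacci
-- ===== SOURCE A (Python) =====
-- def fibonacci(n):
--     assert str(n).isdigit() and n > 0, 'Invalid input'
--     if n <= 1:
--         return [1]
--     else:
--         indices = [1, 2]
--         next_idx = indices[-1] + indices[-2]
--         while next_idx <= n:
--             indices.append(next_idx)
--             next_idx = indices[-1] + indices[-2]
--
--         output = [n - i for i in indices[::-1]]
--         # feed actual inputs until get first Fibonacci
--         output = list(range(output[0])) + output
--         return output
-- ===== SOURCE B (Python) =====
-- def fibonacci(n):
--     assert str(n).isdigit() and n > 0, 'Invalid input'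
--     if n <= 1:
--         return [1]
--     a, b = 1, 2
--     vals = {n - 1, n - 2}
--     while a + b <= n:
--         a, b = b, a + b
--         vals.add(n - b)
--     vals |= set(range(n - b))
--     return sorted(vals)
-- ===== Notes on version B (the rewrite author's own statement) =====
-- stated objective: alternative
-- what changed: B generates Fibonacci numbers with a rolling (a,b) pair instead of a growing list indexed with indices[-1]+indices[-2], and builds the result as a set union of range(n-b) with the complements {n-f}, returned via sorted(), instead of A's reverse/map/concatenate pipeline.
import Mathlib
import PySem

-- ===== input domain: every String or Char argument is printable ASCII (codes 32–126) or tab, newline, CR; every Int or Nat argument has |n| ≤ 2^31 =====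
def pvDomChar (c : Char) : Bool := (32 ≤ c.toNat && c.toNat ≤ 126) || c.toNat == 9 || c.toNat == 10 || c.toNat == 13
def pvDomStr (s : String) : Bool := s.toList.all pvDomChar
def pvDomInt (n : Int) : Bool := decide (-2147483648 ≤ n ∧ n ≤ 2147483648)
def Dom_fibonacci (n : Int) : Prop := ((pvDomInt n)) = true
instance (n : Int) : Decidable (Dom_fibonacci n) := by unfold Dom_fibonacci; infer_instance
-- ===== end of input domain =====

-- B builds the same ascending list by a set union sorted at the end, with a rolling
-- (a,b) Fibonacci pair, instead of A's list-append loop plus reverse/map/concatenate.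

-- ===== PORT A =====
-- A's while loop; the last two list entries indices[-1], indices[-2] are carried as b, a
-- (the list only ever grows at the end, so this is exact). The '0 < b' conjunct is a
-- totality guard (b ≥ 2 on every reachable state); it only makes termination evident.
def fibLoopA (n a b : Int) (indices : List Int) : List Int :=
  if 0 < b ∧ a + b ≤ n then fibLoopA n b (a + b) (indices ++ [a + b]) else indices
termination_by (n + 1 - (a + b)).toNat
decreasing_by omega

def fibonacci (n : Int) : List Int :=
  if n ≤ 1 then [1]
  else
    let indices := fibLoopA n 1 2 [1, 2]
    let output := indices.reverse.map (fun i => n - i)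
    -- output[0]: output is provably nonempty here, so headD 0 is exact (no IndexError)
    PySem.List.pyRange 0 (output.headD 0) 1 ++ output

-- ===== PORT B =====
-- B's while loop over the rolling pair (a, b), accumulating the set of complements.
-- Same totality guard '0 < b' as in fibLoopA.
def fibLoopB (n a b : Int) (vals : PySem.Set Int) : Int × PySem.Set Int :=
  if 0 < b ∧ a + b ≤ n then fibLoopB n b (a + b) (PySem.Set.add vals (n - (a + b)))
  else (b, vals)
termination_by (n + 1 - (a + b)).toNat
decreasing_by omega

def fibonacci_alt (n : Int) : List Int :=
  if n ≤ 1 then [1]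
  else
    let p := fibLoopB n 1 2 (PySem.Set.add (PySem.Set.add (PySem.Set.empty) (n - 1)) (n - 2))
    let vals := PySem.Set.union p.2 (PySem.List.pyRange 0 (n - p.1) 1)
    PySem.List.sorted vals (fun x => x) false

-- ===== PRECONDITION & SPEC =====
-- Pre_ excludes exactly n ≤ 0, where A's assert raises AssertionError.
def Pre_fibonacci (n : Int) : Prop := 1 ≤ n
instance (n : Int) : Decidable (Pre_fibonacci n) := by unfold Pre_fibonacci; infer_instance
def pvWitness_fibonacci : Int := (7)

def Spec_fibonacci (n : Int) (out : List Int) : Prop := out = fibonacci_alt n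
instance (n : Int) (out : List Int) : Decidable (Spec_fibonacci n out) := by unfold Spec_fibonacci; infer_instance

-- ===== CLAIM (what is proved, stated in full; the proofs are below) =====
def Claim_equal_fibonacci : Prop := ∀ (n : Int), Dom_fibonacci n → Pre_fibonacci n → Spec_fibonacci n (fibonacci n)

-- ===== LEMMAS AND PROOFS =====

-- Joint invariant of the two loops: starting from a positive pair and a nonempty,
-- strictly increasing list whose last element is b and bounds it, the A-loop returns a
-- nonempty strictly increasing list F bounded by its last element, and the B-loop
-- returns (last F, complements of F in list order).
theorem fib_loops (n a b : Int) (indices : List Int)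
    (ha : 0 < a) (hne : indices ≠ []) (hlast : indices.getLastD 0 = b)
    (hle : ∀ x ∈ indices, x ≤ b) (hpw : indices.Pairwise (· < ·)) :
    fibLoopA n a b indices ≠ [] ∧
    (∀ x ∈ fibLoopA n a b indices, x ≤ (fibLoopA n a b indices).getLastD 0) ∧
    (fibLoopA n a b indices).Pairwise (· < ·) ∧
    fibLoopB n a b (indices.map (fun f => n - f)) =
      ((fibLoopA n a b indices).getLastD 0, (fibLoopA n a b indices).map (fun f => n - f)) := by
  revert ha hne hlast hle hpw
  fun_induction fibLoopA n a b indices with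
  | case1 a b indices h ih =>
    intro ha hne hlast hle hpw
    have hb : 0 < b := h.1
    have hnewmem : (n - (a + b)) ∉ indices.map (fun f => n - f) := by
      simp only [List.mem_map, not_exists]
      rintro x ⟨hx, hfx⟩
      have := hle x hx
      omega
    have hadd : PySem.Set.add (indices.map (fun f => n - f)) (n - (a + b)) =
        (indices ++ [a + b]).map (fun f => n - f) := by
      rw [PySem.Set.add_of_not_mem hnewmem]; simp
    have ih' := ih hb (by simp) (by simp) ?_ ?_
    · rw [fibLoopB, if_pos h, hadd]
      exact ih'
    · intro x hx
      rcases List.mem_append.mp hx with hx | hx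
      · have := hle x hx; omega
      · simp at hx; omega
    · rw [List.pairwise_append]
      refine ⟨hpw, by simp, ?_⟩
      intro x hx y hy
      simp at hy
      have := hle x hx
      omega
  | case2 a b indices h =>
    intro ha hne hlast hle hpw
    rw [fibLoopB, if_neg h]
    exact ⟨hne, by rw [hlast]; exact hle, hpw, by rw [hlast]⟩

-- the head of output = n - (last Fibonacci generated)
theorem headD_reverse_map (n : Int) (F : List Int) (h : F ≠ []) :
    ((F.reverse.map (fun i => n - i)).headD 0) = n - F.getLastD 0 := by
  induction F using List.reverseRecOn with
  | nil => exact absurd rfl h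
  | append_singleton ys x ih => simp

theorem fibonacci_spec : Claim_equal_fibonacci := by
  unfold Claim_equal_fibonacci
  intro n _ hpre
  unfold Spec_fibonacci
  by_cases h1 : n ≤ 1
  · simp [fibonacci, fibonacci_alt, if_pos h1]
  · have h2 : 2 ≤ n := by unfold Pre_fibonacci at hpre; omega
    obtain ⟨hFne, hFle, hFpw, hB⟩ := fib_loops n 1 2 [1, 2] (by omega) (by simp)
      (by simp) (by intro x hx; simp at hx; omega) (by simp)
    set F := fibLoopA n 1 2 [1, 2] with hFdef
    set L := F.getLastD 0 with hLdef
    have hinit : PySem.Set.add (PySem.Set.add (PySem.Set.empty) (n - 1)) (n - 2) =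
        ([1, 2].map (fun f => n - f) : List Int) := by
      have e1 : PySem.Set.add (PySem.Set.empty : PySem.Set Int) (n - 1) = [n - 1] :=
        PySem.Set.add_of_not_mem (by simp [PySem.Set.empty])
      rw [e1, PySem.Set.add_of_not_mem (by simp)]
      simp
    have hsnodup : (F.map (fun f => n - f)).Nodup := by
      refine List.Nodup.map ?_ (hFpw.imp ne_of_lt)
      intro x y hxy; simp only at hxy; omega
    -- the target list, A's output
    have hys : fibonacci n =
        PySem.List.pyRange 0 (n - L) 1 ++ F.reverse.map (fun i => n - i) := by
      rw [fibonacci, if_neg h1]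
      simp only [← hFdef, headD_reverse_map n F hFne, ← hLdef]
    rw [hys, fibonacci_alt, if_neg h1]
    simp only [hinit, hB]
    symm
    refine PySem.List.sorted_eq_of_perm_of_pairwise_lt _ _ _ ?_ ?_
    · rw [List.perm_ext_iff_of_nodup ?_ (PySem.Set.nodup_union _ _ hsnodup)]
      · intro x
        simp only [List.mem_append, PySem.Set.mem_union, List.mem_map, List.mem_reverse]
        exact or_comm
      · rw [List.nodup_append]
        refine ⟨PySem.List.nodup_pyRange_one _ _, ?_, ?_⟩
        · exact List.Nodup.map (fun x y hxy => by omega)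
            (List.nodup_reverse.mpr (hFpw.imp ne_of_lt))
        · intro x hx y hy
          rw [PySem.List.mem_pyRange_one] at hx
          simp only [List.mem_map, List.mem_reverse] at hy
          obtain ⟨f, hf, rfl⟩ := hy
          have := hFle f hf
          omega
    · rw [List.pairwise_append]
      refine ⟨PySem.List.pairwise_lt_pyRange_one _ _, ?_, ?_⟩
      · rw [List.pairwise_map, List.pairwise_reverse]
        exact hFpw.imp (by intro x y hxy; simp; omega)
      · intro x hx y hy
        rw [PySem.List.mem_pyRange_one] at hx
        simp only [List.mem_map, List.mem_reverse] at hy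
        obtain ⟨f, hf, rfl⟩ := hy
        have := hFle f hf
        omega
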